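-- pv_equiv track=rewrite | github.com/TeddyDou/COMP-6791-P1-python3 | TokenNormalizer.py | validate_string
-- ===== SOURCE A (Python) =====
-- def validate_string(s):
--     isvalid = False
--     for char in s:
--         if char.isdigit():
--             isvalid = False
--         elif char.isalpha():
--             isvalid = True
--     return isvalid
-- ===== SOURCE B (Python) =====
-- def validate_string(s):
--     chars = [c for c in s if c.isdigit() or c.isalpha()]
--     return bool(chars) and chars[-1].isalpha()
-- ===== Notes on version B (the rewrite author's own statement) =====
-- stated objective: simpler
-- what changed: Replaced the stateful running-flag loop with a filter of the decisive (digit/letter) characters followed by a single test of the last one.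
import Mathlib
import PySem

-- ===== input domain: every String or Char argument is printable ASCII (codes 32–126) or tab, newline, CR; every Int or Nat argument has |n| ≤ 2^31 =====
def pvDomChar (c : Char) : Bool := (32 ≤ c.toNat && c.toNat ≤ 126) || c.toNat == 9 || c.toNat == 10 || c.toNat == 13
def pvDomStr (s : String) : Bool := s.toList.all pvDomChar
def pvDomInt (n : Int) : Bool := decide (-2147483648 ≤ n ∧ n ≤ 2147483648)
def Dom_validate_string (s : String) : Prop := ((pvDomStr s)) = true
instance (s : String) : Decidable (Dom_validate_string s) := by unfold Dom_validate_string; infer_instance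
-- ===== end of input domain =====

-- B replaces A's running-flag loop by filter-the-decisive-chars-then-test-the-last; objective: simpler.


-- ===== PORT A =====
def validate_string (s : String) : Bool :=
  s.toList.foldl
    (fun isvalid char =>
      if PySem.Chars.isdigit char then false
      else if PySem.Chars.isalpha char then true
      else isvalid)
    false

-- ===== PORT B =====
-- B: filter the decisive characters, then test the last one.
def validate_string_alt (s : String) : Bool :=
  let chars := s.toList.filter (fun c => PySem.Chars.isdigit c || PySem.Chars.isalpha c)
  decide (chars ≠ []) && (match chars.getLast? with
    | some c => PySem.Chars.isalpha c
    | none => false)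

-- ===== PRECONDITION & SPEC =====
def Spec_validate_string (s : String) (out : Bool) : Prop := out = validate_string_alt s
instance (s : String) (out : Bool) : Decidable (Spec_validate_string s out) := by unfold Spec_validate_string; infer_instance

-- ===== CLAIM (what is proved, stated in full; the proofs are below) =====
def Claim_equal_validate_string : Prop := ∀ (s : String), Dom_validate_string s → Spec_validate_string s (validate_string s)

-- ===== LEMMAS AND PROOFS =====

-- ===== VERDICT (by name: the statement is the Claim_ definition above) =====
lemma digit_not_alpha (c : Char) (h : PySem.Chars.isdigit c = true) :
    PySem.Chars.isalpha c = false := by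
  unfold PySem.Chars.isdigit PySem.Chars.isalpha PySem.Chars.isupper PySem.Chars.islower at *
  simp only [Bool.and_eq_true, decide_eq_true_eq, Bool.or_eq_false_iff, Bool.and_eq_false_iff,
    decide_eq_false_iff_not, Char.le_def, UInt32.le_iff_toNat_le,
    show ('0':Char).val.toNat = 48 from rfl, show ('9':Char).val.toNat = 57 from rfl,
    show ('A':Char).val.toNat = 65 from rfl, show ('Z':Char).val.toNat = 90 from rfl,
    show ('a':Char).val.toNat = 97 from rfl, show ('z':Char).val.toNat = 122 from rfl] at h ⊢
  omega

lemma fold_eq (cs : List Char) : ∀ (acc : Bool),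
    cs.foldl
      (fun isvalid char =>
        if PySem.Chars.isdigit char then false
        else if PySem.Chars.isalpha char then true
        else isvalid) acc
    = (match (cs.filter (fun c => PySem.Chars.isdigit c || PySem.Chars.isalpha c)).getLast? with
       | some c => PySem.Chars.isalpha c
       | none => acc) := by
  induction cs with
  | nil => intro acc; rfl
  | cons c cs ih =>
    intro acc
    simp only [List.foldl_cons, List.filter_cons]
    by_cases hd : PySem.Chars.isdigit c
    · simp only [hd, if_true, Bool.true_or]
      rw [ih]
      cases h : cs.filter (fun c => PySem.Chars.isdigit c || PySem.Chars.isalpha c) with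
      | nil => simp [digit_not_alpha c hd]
      | cons d t =>
        cases hl : (d :: t).getLast? with
        | none => simp at hl
        | some x => simp [hl]
    · by_cases ha : PySem.Chars.isalpha c
      · simp only [hd, ha, if_true, Bool.false_or, if_false, Bool.or_true]
        rw [ih]
        cases h : cs.filter (fun c => PySem.Chars.isdigit c || PySem.Chars.isalpha c) with
        | nil => simp [ha]
        | cons d t =>
          cases hl : (d :: t).getLast? with
          | none => simp at hl
          | some x => simp [hl]
      · simp only [hd, ha, if_false, Bool.false_or, Bool.or_self]
        exact ih acc

-- ===== VERDICT (by name: the statement is the Claim_ definition above) =====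
theorem validate_string_spec : Claim_equal_validate_string := by
  intro s _
  unfold Spec_validate_string validate_string validate_string_alt
  rw [fold_eq]
  cases s.toList.filter (fun c => PySem.Chars.isdigit c || PySem.Chars.isalpha c) with
  | nil => simp
  | cons d t => simp
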